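-- pv_equiv track=rewrite | github.com/MrBrantCode/unitest_baseline | mut_generate/mist_train_taco/taco_5156/solution.py | shortest_village_distances
-- ===== SOURCE A (Python) =====
-- from collections import deque
--
-- def shortest_village_distances(n, m, main_roads, start_node):
--     # Create sets to store main roads and nodes involved in main roads
--     pe = set(main_roads)
--     pe1 = set(node for road in main_roads for node in road)
--
--     # Initialize result list with None
--     res = [None] * (n + 1)
--
--     # BFS function to calculate shortest distances
--     def bfs(s, pe, res, n, pe1):
--         notdiscovered = set(range(1, n + 1))
--         q = deque()
--         level = 0
--         q.append((s, level))
--         notdiscovered.discard(s)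
--         while q and notdiscovered:
--             v = q.popleft()
--             i = v[0]
--             level = v[1] + 1
--             nd = []
--             for j in notdiscovered:
--                 if j == i:
--                     continue
--                 if i not in pe1 and j not in pe1 or ((i, j) not in pe and (j, i) not in pe):
--                     q.append((j, level))
--                     nd.append(j)
--                     res[j] = level
--             for j in nd:
--                 notdiscovered.discard(j)
--         return res
--
--     # Call BFS function
--     res = bfs(start_node, pe, res, n, pe1)
--
--     # Filter out the start node and return the result
--     return [dist for dist in res if dist is not None and dist != 0]
-- ===== SOURCE B (Python) =====
-- def shortest_village_distances(n, m, main_roads, start_node):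
--     # Level-synchronous BFS on the complement graph: instead of a node queue and
--     # per-node edge tests, build forbidden-adjacency sets once and advance whole
--     # levels at a time; an unvisited node joins the next level iff the count of
--     # frontier nodes forbidden to it is smaller than the frontier size.
--     adj = {}
--     for a, b in main_roads:
--         adj.setdefault(a, set()).add(b)
--         adj.setdefault(b, set()).add(a)
--
--     dist = {start_node: 0}
--     frontier = [start_node]
--     unvisited = [j for j in range(1, n + 1) if j != start_node]
--     level = 0
--     while frontier and unvisited:
--         level += 1
--         nxt, rest = [], []
--         for j in unvisited:
--             blocked = sum(1 for x in frontier if x in adj.get(j, ()))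
--             if blocked < len(frontier):
--                 dist[j] = level
--                 nxt.append(j)
--             else:
--                 rest.append(j)
--         frontier, unvisited = nxt, rest
--     return [dist[j] for j in range(1, n + 1) if j in dist and dist[j] != 0]
-- ===== Notes on version B (the rewrite author's own statement) =====
-- stated objective: alternative
-- what changed: Replaces A's deque-based node-at-a-time BFS (popping (node,level) pairs and partitioning a shrinking undiscovered set per popped node with a redundant pe1 guard) by a level-synchronous BFS that precomputes forbidden-adjacency sets per node and advances a whole frontier at once: an unvisited node enters the next level iff its count of forbidden frontier neighbours is below the frontier size.
import Mathlib
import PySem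

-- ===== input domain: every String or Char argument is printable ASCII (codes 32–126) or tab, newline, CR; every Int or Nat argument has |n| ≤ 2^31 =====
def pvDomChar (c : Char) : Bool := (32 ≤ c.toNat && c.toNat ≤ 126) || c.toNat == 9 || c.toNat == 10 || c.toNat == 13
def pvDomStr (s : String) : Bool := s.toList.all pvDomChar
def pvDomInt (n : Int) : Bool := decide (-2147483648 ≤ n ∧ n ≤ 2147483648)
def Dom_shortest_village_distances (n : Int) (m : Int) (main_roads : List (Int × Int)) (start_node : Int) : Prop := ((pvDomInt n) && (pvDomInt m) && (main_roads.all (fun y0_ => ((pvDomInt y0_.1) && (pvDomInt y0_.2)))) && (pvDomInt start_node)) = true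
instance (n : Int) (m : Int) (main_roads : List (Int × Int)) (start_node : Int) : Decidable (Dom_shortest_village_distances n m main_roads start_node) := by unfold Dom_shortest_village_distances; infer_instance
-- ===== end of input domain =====

-- B replaces A's deque-based node-at-a-time BFS (partitioning a shrinking undiscovered set
-- per popped node, with a redundant pe1 node-set guard) by a level-synchronous BFS over
-- precomputed forbidden-adjacency sets: a whole frontier advances at once, and an unvisited
-- node joins the next level iff its count of forbidden frontier neighbours is below the
-- frontier size.  A's iteration over the Python set 'notdiscovered' only affects queue
-- order, never the returned distances, so the A port fixes the increasing order.

-- ===== PORT A =====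
-- the compound guard of A's inner loop, literally
def pvAcond (pe : PySem.Set (Int × Int)) (pe1 : PySem.Set Int) (i j : Int) : Bool :=
  (!(PySem.Set.contains pe1 i) && !(PySem.Set.contains pe1 j))
   || (!(PySem.Set.contains pe (i, j)) && !(PySem.Set.contains pe (j, i)))

-- one step of 'for j in notdiscovered'; state = (queue, nd, res).
-- res[j] = level: j always lies in 1..n < len(res), so the total pySetD is exact here.
def pvAinner (pe : PySem.Set (Int × Int)) (pe1 : PySem.Set Int) (i level : Int)
    (st : List (Int × Int) × List Int × List (Option Int)) (j : Int) :
    List (Int × Int) × List Int × List (Option Int) :=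
  if j == i then st
  else if pvAcond pe pe1 i j then
    (st.1 ++ [(j, level)], st.2.1 ++ [j], PySem.List.pySetD st.2.2 j (some level))
  else st

-- 'while q and notdiscovered': fuel is a pure totality guard; the caller passes n.toNat + 1,
-- which bounds the number of iterations (each iteration pops one queue entry and entries are
-- pushed at most once per node of 1..n plus the start node).
def pvAloop (pe : PySem.Set (Int × Int)) (pe1 : PySem.Set Int) :
    Nat → List (Int × Int) → PySem.Set Int → List (Option Int) → List (Option Int)
  | 0, _, _, res => res
  | fuel + 1, q, nd, res =>
    match q with
    | [] => res
    | (i, lv) :: qrest =>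
      if nd = [] then res
      else
        let st := nd.foldl (pvAinner pe pe1 i (lv + 1)) (qrest, ([] : List Int), res)
        pvAloop pe pe1 fuel st.1 (st.2.1.foldl PySem.Set.discard nd) st.2.2

def shortest_village_distances (n : Int) (m : Int) (main_roads : List (Int × Int)) (start_node : Int) : List Int :=
  let pe : PySem.Set (Int × Int) := PySem.Set.ofList main_roads
  let pe1 : PySem.Set Int := PySem.Set.ofList (main_roads.flatMap (fun r => [r.1, r.2]))
  let res0 : List (Option Int) := List.replicate (n + 1).toNat none
  let nd0 : PySem.Set Int := PySem.Set.discard (PySem.Set.ofList (PySem.List.pyRange 1 (n + 1) 1)) start_node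
  let res := pvAloop pe pe1 (n.toNat + 1) [(start_node, 0)] nd0 res0
  res.filterMap (fun o => match o with
    | none => none
    | some d => if d ≠ 0 then some d else none)

-- ===== PORT B =====
-- adj.setdefault(a, set()).add(b): the key a now maps to its old set (or a fresh one) with b added
def pvAddNbr (adj : PySem.Dict Int (PySem.Set Int)) (a b : Int) : PySem.Dict Int (PySem.Set Int) :=
  adj.insert a (PySem.Set.add (adj.getD a []) b)

-- the forbidden-adjacency dictionary built by B's first loop
def pvAdjOf (main_roads : List (Int × Int)) : PySem.Dict Int (PySem.Set Int) :=
  main_roads.foldl (fun d p => pvAddNbr (pvAddNbr d p.1 p.2) p.2 p.1) PySem.Dict.empty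

-- body of 'for j in unvisited'; state = (nxt, rest, dist)
def pvBstep (adj : PySem.Dict Int (PySem.Set Int)) (fr : List Int) (level : Int)
    (st : List Int × List Int × PySem.Dict Int Int) (j : Int) :
    List Int × List Int × PySem.Dict Int Int :=
  let blocked : Int := ((fr.filter (fun x => PySem.Set.contains (adj.getD j []) x)).length : Int)
  if blocked < (fr.length : Int) then (st.1 ++ [j], st.2.1, st.2.2.insert j level)
  else (st.1, st.2.1 ++ [j], st.2.2)

-- 'while frontier and unvisited': fuel is a pure totality guard; n.toNat + 1 bounds the
-- number of levels (each productive level removes at least one unvisited node).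
def pvBloop (adj : PySem.Dict Int (PySem.Set Int)) :
    Nat → Int → List Int → List Int → PySem.Dict Int Int → PySem.Dict Int Int
  | 0, _, _, _, dist => dist
  | fuel + 1, level, fr, unv, dist =>
    if fr = [] ∨ unv = [] then dist
    else
      let st := unv.foldl (pvBstep adj fr (level + 1)) (([] : List Int), ([] : List Int), dist)
      pvBloop adj fuel (level + 1) st.1 st.2.1 st.2.2

def shortest_village_distances_alt (n : Int) (m : Int) (main_roads : List (Int × Int)) (start_node : Int) : List Int :=
  let adj := pvAdjOf main_roads
  let unv0 : List Int := (PySem.List.pyRange 1 (n + 1) 1).filter (fun j => !(j == start_node))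
  let dist := pvBloop adj (n.toNat + 1) 0 [start_node] unv0 (PySem.Dict.empty.insert start_node 0)
  (PySem.List.pyRange 1 (n + 1) 1).filterMap (fun j =>
    match PySem.Dict.get? dist j with
    | some d => if d ≠ 0 then some d else none
    | none => none)

-- ===== PRECONDITION & SPEC =====
def Spec_shortest_village_distances (n : Int) (m : Int) (main_roads : List (Int × Int)) (start_node : Int) (out : List Int) : Prop := out = shortest_village_distances_alt n m main_roads start_node
instance (n : Int) (m : Int) (main_roads : List (Int × Int)) (start_node : Int) (out : List Int) : Decidable (Spec_shortest_village_distances n m main_roads start_node out) := by unfold Spec_shortest_village_distances; infer_instance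

-- ===== CLAIM (what is proved, stated in full; the proofs are below) =====
def Claim_equal_shortest_village_distances : Prop := ∀ (n : Int) (m : Int) (main_roads : List (Int × Int)) (start_node : Int), Dom_shortest_village_distances n m main_roads start_node → Spec_shortest_village_distances n m main_roads start_node (shortest_village_distances n m main_roads start_node)

-- ===== LEMMAS AND PROOFS =====

-- the forbidden-edge test, shared vocabulary of the proofs
def pvIsRoad (pe : PySem.Set (Int × Int)) (i j : Int) : Bool :=
  PySem.Set.contains pe (i, j) || PySem.Set.contains pe (j, i)

lemma pvR_eq (n : Int) :
    PySem.List.pyRange 1 (n + 1) 1 = (List.range n.toNat).map (fun k : Nat => 1 + (k : Int)) := by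
  unfold PySem.List.pyRange
  rw [if_neg one_ne_zero]
  by_cases h : 0 < n
  · rw [if_pos (by norm_num), if_pos (by omega)]
    have hc : ((n + 1 - 1 + 1 - 1) / 1).toNat = n.toNat := by simp
    rw [hc]
    apply List.map_congr_left
    intro k _
    ring
  · rw [if_pos (by norm_num), if_neg (by omega)]
    rw [Int.toNat_of_nonpos (by omega : n ≤ 0)]
    rfl

lemma pvR_mem (n x : Int) : x ∈ PySem.List.pyRange 1 (n + 1) 1 ↔ 1 ≤ x ∧ x ≤ n := by
  rw [pvR_eq, List.mem_map]
  constructor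
  · rintro ⟨k, hk, rfl⟩
    rw [List.mem_range] at hk
    omega
  · rintro ⟨h1, h2⟩
    refine ⟨(x - 1).toNat, ?_, by omega⟩
    rw [List.mem_range]
    omega

lemma pvR_nodup (n : Int) : (PySem.List.pyRange 1 (n + 1) 1).Nodup := by
  rw [pvR_eq]
  refine List.Nodup.map ?_ List.nodup_range
  intro a b hab
  have : (1 : Int) + a = 1 + b := hab
  omega

-- what A's res array holds at slot j, expressed from B's dist dictionary
def pvMask (s : Int) (dist : PySem.Dict Int Int) (j : Int) : Option Int :=
  match dist.get? j with
  | some d => if j = s then none else some d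
  | none => none

-- the final filters of the two ports
def pvF (o : Option Int) : Option Int :=
  match o with
  | none => none
  | some d => if d ≠ 0 then some d else none

def pvOut (dist : PySem.Dict Int Int) (j : Int) : Option Int :=
  match dist.get? j with
  | some d => if d ≠ 0 then some d else none
  | none => none

lemma pvCond_eq (main_roads : List (Int × Int)) (i j : Int) :
    pvAcond (PySem.Set.ofList main_roads)
      (PySem.Set.ofList (main_roads.flatMap (fun r => [r.1, r.2]))) i j
    = (!(PySem.Set.contains (PySem.Set.ofList main_roads) (i, j))
        && !(PySem.Set.contains (PySem.Set.ofList main_roads) (j, i))) := by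
  have hpe : ∀ a b : Int,
      PySem.Set.contains (PySem.Set.ofList main_roads) (a, b) = true →
      PySem.Set.contains (PySem.Set.ofList (main_roads.flatMap (fun r => [r.1, r.2]))) a = true ∧
      PySem.Set.contains (PySem.Set.ofList (main_roads.flatMap (fun r => [r.1, r.2]))) b = true := by
    intro a b hab
    rw [PySem.Set.contains_iff, PySem.Set.mem_ofList] at hab
    constructor <;>
    · rw [PySem.Set.contains_iff, PySem.Set.mem_ofList, List.mem_flatMap]
      exact ⟨(a, b), hab, by simp⟩
  unfold pvAcond
  cases h1 : PySem.Set.contains (PySem.Set.ofList (main_roads.flatMap (fun r => [r.1, r.2]))) i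
  · cases h2 : PySem.Set.contains (PySem.Set.ofList (main_roads.flatMap (fun r => [r.1, r.2]))) j
    · have e1 : PySem.Set.contains (PySem.Set.ofList main_roads) (i, j) = false := by
        cases h : PySem.Set.contains (PySem.Set.ofList main_roads) (i, j)
        · rfl
        · have hh := (hpe i j h).1
          rw [h1] at hh
          exact absurd hh (by simp)
      have e2 : PySem.Set.contains (PySem.Set.ofList main_roads) (j, i) = false := by
        cases h : PySem.Set.contains (PySem.Set.ofList main_roads) (j, i)
        · rfl
        · have hh := (hpe j i h).1
          rw [h2] at hh
          exact absurd hh (by simp)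
      rw [e1, e2]
      rfl
    · simp
  · simp

lemma pvOut_eq (n s : Int) (dist : PySem.Dict Int Int) (hs : dist.get? s = some 0) :
    (none :: (PySem.List.pyRange 1 (n + 1) 1).map (pvMask s dist)).filterMap pvF
      = (PySem.List.pyRange 1 (n + 1) 1).filterMap (pvOut dist) := by
  rw [List.filterMap_cons]
  have h0 : pvF none = none := rfl
  rw [h0, List.filterMap_map]
  apply List.filterMap_congr
  intro j hj
  by_cases hjs : j = s
  · subst hjs
    simp [Function.comp, pvMask, pvF, pvOut, hs]
  · cases h : dist.get? j <;> simp [Function.comp, pvMask, pvF, pvOut, h, hjs]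

lemma pvSet_map (n : Int) (f : Int → Option Int) (j : Int) (hj : 1 ≤ j) (hjn : j ≤ n) (v : Option Int) :
    PySem.List.pySetD (none :: (PySem.List.pyRange 1 (n + 1) 1).map f) j v
      = none :: (PySem.List.pyRange 1 (n + 1) 1).map (fun x => if x = j then v else f x) := by
  rw [PySem.List.pySetD_of_nonneg _ v (by omega)]
  rw [pvR_eq]
  apply List.ext_getElem
  · simp
  · intro k h1 h2
    simp only [List.length_cons, List.length_set, List.length_map, List.length_range] at h1 h2
    rcases Nat.eq_zero_or_pos k with hk | hk
    · subst hk
      simp only [List.getElem_set]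
      rw [if_neg (by omega)]
      rfl
    · obtain ⟨k', rfl⟩ : ∃ k', k = k' + 1 := ⟨k - 1, by omega⟩
      simp only [List.getElem_set, List.getElem_cons_succ, List.getElem_map, List.getElem_range]
      split_ifs with hA hB hB <;> first | rfl | (exfalso; omega)

lemma pvFoldDiscard : ∀ (ys nd : List Int),
    ys.foldl PySem.Set.discard nd = nd.filter (fun x => !(ys.contains x)) := by
  intro ys
  induction ys with
  | nil => intro nd; simp
  | cons y ys ih =>
    intro nd
    rw [List.foldl_cons, ih]
    show (PySem.Set.discard nd y).filter _ = _
    unfold PySem.Set.discard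
    rw [List.filter_filter]
    apply List.filter_congr
    intro x _
    by_cases hxy : x = y
    · simp [hxy]
    · simp [hxy]

lemma pvFoldInsertGet : ∀ (ys : List Int) (dist : PySem.Dict Int Int) (v x : Int),
    (ys.foldl (fun dd j => dd.insert j v) dist).get? x
      = if x ∈ ys then some v else dist.get? x := by
  intro ys
  induction ys with
  | nil => intro dist v x; simp
  | cons y ys ih =>
    intro dist v x
    rw [List.foldl_cons, ih]
    by_cases hxy : x = y
    · subst hxy
      by_cases hx : x ∈ ys
      · simp [hx]
      · simp [hx, PySem.Dict.get?_insert_self]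
    · by_cases hx : x ∈ ys
      · simp [hx, hxy]
      · simp [hx, hxy, PySem.Dict.get?_insert_of_ne _ _ hxy]

lemma pvFoldInsertContains (ys : List Int) (dist : PySem.Dict Int Int) (v x : Int) :
    (ys.foldl (fun dd j => dd.insert j v) dist).contains x
      = (decide (x ∈ ys) || dist.contains x) := by
  rw [PySem.Dict.contains_eq_isSome_get?, pvFoldInsertGet]
  by_cases hx : x ∈ ys
  · simp [hx]
  · simp [hx, PySem.Dict.contains_eq_isSome_get?]

-- per-pop effect of A's inner 'for j in notdiscovered' loop
lemma pvAfold (pe : PySem.Set (Int × Int)) (pe1 : PySem.Set Int)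
    (hcond : ∀ i j, pvAcond pe pe1 i j
      = (!(PySem.Set.contains pe (i, j)) && !(PySem.Set.contains pe (j, i))))
    (i li : Int) :
    ∀ (L : List Int) (qA : List (Int × Int)) (ndAcc : List Int) (res : List (Option Int)),
      (∀ j ∈ L, j ≠ i) →
      L.foldl (pvAinner pe pe1 i (li + 1)) (qA, ndAcc, res)
        = (qA ++ (L.filter (fun j => !(pvIsRoad pe i j))).map (fun j => (j, li + 1)),
           ndAcc ++ L.filter (fun j => !(pvIsRoad pe i j)),
           (L.filter (fun j => !(pvIsRoad pe i j))).foldl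
             (fun r j => PySem.List.pySetD r j (some (li + 1))) res) := by
  intro L
  induction L with
  | nil => intro qA ndAcc res _; simp
  | cons j L ih =>
    intro qA ndAcc res hL
    have hji : j ≠ i := hL j (by simp)
    have hLt : ∀ x ∈ L, x ≠ i := fun x hx => hL x (List.mem_cons_of_mem _ hx)
    have hcnd : pvAcond pe pe1 i j = !(pvIsRoad pe i j) := by
      rw [hcond]
      unfold pvIsRoad
      cases PySem.Set.contains pe (i, j) <;> cases PySem.Set.contains pe (j, i) <;> rfl
    rw [List.foldl_cons]
    by_cases hr : pvIsRoad pe i j = true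
    · have hA : pvAinner pe pe1 i (li + 1) (qA, ndAcc, res) j = (qA, ndAcc, res) := by
        unfold pvAinner
        rw [if_neg (by simp [hji]), if_neg (by rw [hcnd, hr]; simp)]
      rw [hA, List.filter_cons_of_neg (by simp [hr]), ih _ _ _ hLt]
    · have hrf : pvIsRoad pe i j = false := by simpa using hr
      have hA : pvAinner pe pe1 i (li + 1) (qA, ndAcc, res) j
          = (qA ++ [(j, li + 1)], ndAcc ++ [j], PySem.List.pySetD res j (some (li + 1))) := by
        unfold pvAinner
        rw [if_neg (by simp [hji]), if_pos (by rw [hcnd, hrf]; rfl)]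
      rw [hA, List.filter_cons_of_pos (by simp [hrf]), ih _ _ _ hLt]
      simp

-- writing one level's chunk of res, on the masked form
lemma pvResFold (n s li : Int) :
    ∀ (f : List Int) (g : Int → Option Int),
      (∀ j ∈ f, 1 ≤ j ∧ j ≤ n) →
      f.foldl (fun r j => PySem.List.pySetD r j (some (li + 1)))
          (none :: (PySem.List.pyRange 1 (n + 1) 1).map g)
        = none :: (PySem.List.pyRange 1 (n + 1) 1).map
            (fun x => if x ∈ f then some (li + 1) else g x) := by
  intro f
  induction f with
  | nil =>
    intro g _
    simp
  | cons j f ih =>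
    intro g hf
    obtain ⟨hj1, hj2⟩ := hf j (by simp)
    rw [List.foldl_cons, pvSet_map n g j hj1 hj2,
      ih _ (fun x hx => hf x (List.mem_cons_of_mem _ hx))]
    congr 1
    apply List.map_congr_left
    intro x _
    by_cases hxf : x ∈ f
    · simp [hxf]
    · by_cases hxj : x = j
      · simp [hxf, hxj]
      · simp [hxf, hxj]

-- trivial terminations of the two loops
lemma pvAloop_nil_q (pe : PySem.Set (Int × Int)) (pe1 : PySem.Set Int) (fuel : Nat)
    (nd : PySem.Set Int) (res : List (Option Int)) :
    pvAloop pe pe1 fuel [] nd res = res := by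
  cases fuel <;> rfl

lemma pvAloop_nil_nd (pe : PySem.Set (Int × Int)) (pe1 : PySem.Set Int) (fuel : Nat)
    (q : List (Int × Int)) (res : List (Option Int)) :
    pvAloop pe pe1 fuel q [] res = res := by
  cases fuel with
  | zero => rfl
  | succ fuel =>
    cases q with
    | nil => rfl
    | cons p qrest =>
      obtain ⟨i, lv⟩ := p
      show (if ([] : List Int) = [] then res
            else
              let st := List.foldl (pvAinner pe pe1 i (lv + 1)) (qrest, ([] : List Int), res) ([] : List Int)
              pvAloop pe pe1 fuel st.1 (List.foldl PySem.Set.discard ([] : List Int) st.2.1) st.2.2) = res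
      rw [if_pos rfl]

lemma pvAloop_succ (pe : PySem.Set (Int × Int)) (pe1 : PySem.Set Int) (fuel : Nat)
    (i lv : Int) (qrest : List (Int × Int)) (nd : PySem.Set Int) (res : List (Option Int))
    (h : ¬ nd = []) :
    pvAloop pe pe1 (fuel + 1) ((i, lv) :: qrest) nd res =
      (let st := nd.foldl (pvAinner pe pe1 i (lv + 1)) (qrest, ([] : List Int), res)
       pvAloop pe pe1 fuel st.1 (st.2.1.foldl PySem.Set.discard nd) st.2.2) := by
  show (if nd = [] then res else _) = _
  rw [if_neg h]

lemma pvBloop_nil_fr (adj : PySem.Dict Int (PySem.Set Int)) (fuel : Nat) (level : Int)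
    (unv : List Int) (dist : PySem.Dict Int Int) :
    pvBloop adj fuel level [] unv dist = dist := by
  cases fuel with
  | zero => rfl
  | succ fuel =>
    show (if ([] : List Int) = [] ∨ unv = [] then dist else _) = dist
    rw [if_pos (Or.inl rfl)]

lemma pvBloop_nil_unv (adj : PySem.Dict Int (PySem.Set Int)) (fuel : Nat) (level : Int)
    (fr : List Int) (dist : PySem.Dict Int Int) :
    pvBloop adj fuel level fr [] dist = dist := by
  cases fuel with
  | zero => rfl
  | succ fuel =>
    show (if fr = [] ∨ ([] : List Int) = [] then dist else _) = dist
    rw [if_pos (Or.inr rfl)]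

lemma pvBloop_succ (adj : PySem.Dict Int (PySem.Set Int)) (fuel : Nat) (level : Int)
    (fr unv : List Int) (dist : PySem.Dict Int Int) (h1 : ¬ fr = []) (h2 : ¬ unv = []) :
    pvBloop adj (fuel + 1) level fr unv dist =
      pvBloop adj fuel (level + 1)
        (unv.foldl (pvBstep adj fr (level + 1)) (([] : List Int), ([] : List Int), dist)).1
        (unv.foldl (pvBstep adj fr (level + 1)) (([] : List Int), ([] : List Int), dist)).2.1
        (unv.foldl (pvBstep adj fr (level + 1)) (([] : List Int), ([] : List Int), dist)).2.2 := by
  show (if fr = [] ∨ unv = [] then dist else _) = _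
  rw [if_neg (by tauto)]

-- B's per-level fold, split into the two filters and the dist writes
lemma pvBfold (adj : PySem.Dict Int (PySem.Set Int)) (fr : List Int) (lv : Int) :
    ∀ (unv nx rs : List Int) (dist : PySem.Dict Int Int),
      unv.foldl (pvBstep adj fr lv) (nx, rs, dist)
        = (nx ++ unv.filter (fun j =>
              decide ((((fr.filter (fun x => PySem.Set.contains (adj.getD j []) x)).length : Int)) < (fr.length : Int))),
           rs ++ unv.filter (fun j =>
              !(decide ((((fr.filter (fun x => PySem.Set.contains (adj.getD j []) x)).length : Int)) < (fr.length : Int)))),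
           (unv.filter (fun j =>
              decide ((((fr.filter (fun x => PySem.Set.contains (adj.getD j []) x)).length : Int)) < (fr.length : Int)))).foldl
             (fun dd j => dd.insert j lv) dist) := by
  intro unv
  induction unv with
  | nil => intro nx rs dist; simp
  | cons j unv ih =>
    intro nx rs dist
    rw [List.foldl_cons]
    by_cases hj : (((fr.filter (fun x => PySem.Set.contains (adj.getD j []) x)).length : Int)) < (fr.length : Int)
    · have hB : pvBstep adj fr lv (nx, rs, dist) j = (nx ++ [j], rs, dist.insert j lv) := by
        unfold pvBstep
        rw [if_pos hj]
      rw [hB, ih, List.filter_cons_of_pos (by simpa using hj),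
        List.filter_cons_of_neg (by simpa using hj)]
      simp
    · have hB : pvBstep adj fr lv (nx, rs, dist) j = (nx, rs ++ [j], dist) := by
        unfold pvBstep
        rw [if_neg hj]
      rw [hB, ih, List.filter_cons_of_neg (by simpa using hj),
        List.filter_cons_of_pos (by simpa using hj)]
      simp

-- the counting test is the existence of a non-forbidden frontier node
lemma pvCnt_lt (fr : List Int) (q : Int → Bool) :
    (((fr.filter q).length : Int) < (fr.length : Int)) ↔ ∃ x ∈ fr, q x = false := by
  rw [Nat.cast_lt]
  constructor
  · intro h
    by_contra hc
    have : (fr.filter q).length = fr.length :=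
      List.length_filter_eq_length_iff.mpr (by
        intro a ha
        cases hq : q a
        · exact absurd ⟨a, ha, hq⟩ hc
        · rfl)
    omega
  · rintro ⟨x, hx, hqx⟩
    have hle := List.length_filter_le q fr
    have : (fr.filter q).length ≠ fr.length := by
      intro he
      have := List.length_filter_eq_length_iff.mp he x hx
      rw [hqx] at this
      cases this
    omega

-- the adjacency dictionary recognises exactly the forbidden edges
lemma pvAdj_getD_mem : ∀ (mr : List (Int × Int)) (d : PySem.Dict Int (PySem.Set Int)) (j x : Int),
    x ∈ (mr.foldl (fun d p => pvAddNbr (pvAddNbr d p.1 p.2) p.2 p.1) d).getD j []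
      ↔ x ∈ d.getD j [] ∨ (j, x) ∈ mr ∨ (x, j) ∈ mr := by
  intro mr
  induction mr with
  | nil => intro d j x; simp
  | cons p t ih =>
    intro d j x
    obtain ⟨a, b⟩ := p
    rw [List.foldl_cons, ih]
    have hstep : x ∈ (pvAddNbr (pvAddNbr d a b) b a).getD j []
        ↔ x ∈ d.getD j [] ∨ (j = a ∧ x = b) ∨ (j = b ∧ x = a) := by
      unfold pvAddNbr
      by_cases hjb : j = b
      · subst hjb
        by_cases hja : j = a
        · subst hja
          simp [PySem.Set.mem_add]
        · rw [PySem.Dict.getD_insert, if_pos rfl, PySem.Set.mem_add,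
            PySem.Dict.getD_insert, if_neg hja]
          tauto
      · rw [PySem.Dict.getD_insert, if_neg hjb]
        by_cases hja : j = a
        · subst hja
          rw [PySem.Dict.getD_insert, if_pos rfl, PySem.Set.mem_add]
          tauto
        · rw [PySem.Dict.getD_insert, if_neg hja]
          tauto
    rw [hstep]
    simp only [List.mem_cons, Prod.mk.injEq]
    tauto

lemma pvAdj_road (mr : List (Int × Int)) (j x : Int) :
    PySem.Set.contains ((pvAdjOf mr).getD j []) x = pvIsRoad (PySem.Set.ofList mr) x j := by
  have h1 : PySem.Set.contains ((pvAdjOf mr).getD j []) x = true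
      ↔ (j, x) ∈ mr ∨ (x, j) ∈ mr := by
    rw [PySem.Set.contains_iff]
    unfold pvAdjOf
    rw [pvAdj_getD_mem]
    simp
  have h2 : pvIsRoad (PySem.Set.ofList mr) x j = true ↔ (j, x) ∈ mr ∨ (x, j) ∈ mr := by
    unfold pvIsRoad
    rw [Bool.or_eq_true, PySem.Set.contains_iff, PySem.Set.contains_iff,
      PySem.Set.mem_ofList, PySem.Set.mem_ofList]
    tauto
  cases hc : PySem.Set.contains ((pvAdjOf mr).getD j []) x
  · cases hr : pvIsRoad (PySem.Set.ofList mr) x j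
    · rfl
    · rw [hc] at h1
      rw [hr] at h2
      exact absurd (h1.mpr (h2.mp rfl)) (by simp)
  · rw [hc] at h1
    rw [(h2.mpr (h1.mp rfl) : _)]

-- the nodes A frees while draining one level, in A's order
def pvFreed (pe : PySem.Set (Int × Int)) : List Int → List Int → List Int
  | [], _ => []
  | i :: t, unv =>
    unv.filter (fun j => !(pvIsRoad pe i j))
      ++ pvFreed pe t (unv.filter (fun j => pvIsRoad pe i j))

def pvRem (pe : PySem.Set (Int × Int)) : List Int → List Int → List Int
  | [], unv => unv
  | i :: t, unv => pvRem pe t (unv.filter (fun j => pvIsRoad pe i j))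

def pvResA (pe : PySem.Set (Int × Int)) (L : Int) : List Int → List Int → List (Option Int) → List (Option Int)
  | [], _, res => res
  | i :: t, unv, res =>
    pvResA pe L t (unv.filter (fun j => pvIsRoad pe i j))
      ((unv.filter (fun j => !(pvIsRoad pe i j))).foldl
        (fun r j => PySem.List.pySetD r j (some (L + 1))) res)

lemma pvFreed_mem (pe : PySem.Set (Int × Int)) :
    ∀ (fr unv : List Int) (j : Int),
      j ∈ pvFreed pe fr unv ↔ j ∈ unv ∧ ∃ i ∈ fr, pvIsRoad pe i j = false := by
  intro fr
  induction fr with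
  | nil => intro unv j; simp [pvFreed]
  | cons i t ih =>
    intro unv j
    show j ∈ _ ++ pvFreed pe t _ ↔ _
    rw [List.mem_append, ih, List.mem_filter, List.mem_filter]
    constructor
    · rintro (⟨hu, hb⟩ | ⟨⟨hu, hr⟩, i', hi', hb⟩)
      · exact ⟨hu, i, by simp, by simpa using hb⟩
      · exact ⟨hu, i', List.mem_cons_of_mem _ hi', hb⟩
    · rintro ⟨hu, i', hi', hb⟩
      rcases List.mem_cons.mp hi' with rfl | hi'
      · exact Or.inl ⟨hu, by simp [hb]⟩
      · by_cases hr : pvIsRoad pe i j = true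
        · exact Or.inr ⟨⟨hu, hr⟩, i', hi', hb⟩
        · exact Or.inl ⟨hu, by simpa using hr⟩

lemma pvRem_eq (pe : PySem.Set (Int × Int)) :
    ∀ (fr unv : List Int),
      pvRem pe fr unv = unv.filter (fun j => fr.all (fun i => pvIsRoad pe i j)) := by
  intro fr
  induction fr with
  | nil => intro unv; simp [pvRem]
  | cons i t ih =>
    intro unv
    show pvRem pe t _ = _
    rw [ih, List.filter_filter]
    apply List.filter_congr
    intro j _
    simp [Bool.and_comm]

lemma pvFilter_len (p : Int → Bool) :
    ∀ l : List Int, (l.filter p).length + (l.filter (fun x => !(p x))).length = l.length := by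
  intro l
  induction l with
  | nil => rfl
  | cons x l ih =>
    by_cases hx : p x = true
    · rw [List.filter_cons_of_pos hx, List.filter_cons_of_neg (by simp [hx])]
      simp only [List.length_cons]
      omega
    · rw [List.filter_cons_of_neg hx, List.filter_cons_of_pos (by simpa using hx)]
      simp only [List.length_cons]
      omega

lemma pvPartition_len (pe : PySem.Set (Int × Int)) :
    ∀ (fr unv : List Int),
      (pvFreed pe fr unv).length + (pvRem pe fr unv).length = unv.length := by
  intro fr
  induction fr with
  | nil => intro unv; simp [pvFreed, pvRem]
  | cons i t ih =>
    intro unv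
    show (_ ++ pvFreed pe t _).length + (pvRem pe t _).length = _
    rw [List.length_append, Nat.add_assoc, ih]
    have := pvFilter_len (fun j => !(pvIsRoad pe i j)) unv
    have h2 : unv.filter (fun j => !(!(pvIsRoad pe i j))) = unv.filter (fun j => pvIsRoad pe i j) := by
      apply List.filter_congr; intro x _; simp
    rw [h2] at this
    omega

lemma pvFreed_nil (pe : PySem.Set (Int × Int)) :
    ∀ fr : List Int, pvFreed pe fr [] = [] := by
  intro fr
  induction fr with
  | nil => rfl
  | cons i t ih => show List.filter _ [] ++ pvFreed pe t (List.filter _ []) = []; simp [ih]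

lemma pvRem_nil (pe : PySem.Set (Int × Int)) :
    ∀ fr : List Int, pvRem pe fr [] = [] := by
  intro fr
  induction fr with
  | nil => rfl
  | cons i t ih => show pvRem pe t (List.filter _ []) = []; simp [ih]

lemma pvResA_nil (pe : PySem.Set (Int × Int)) (L : Int) :
    ∀ (fr : List Int) (res : List (Option Int)), pvResA pe L fr [] res = res := by
  intro fr
  induction fr with
  | nil => intro res; rfl
  | cons i t ih =>
    intro res
    show pvResA pe L t (List.filter _ []) (List.foldl _ res (List.filter _ [])) = res
    simp [ih]

-- A drains one whole level: the queue group at level L becomes the freed group at L+1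
lemma pvAlevel (pe : PySem.Set (Int × Int)) (pe1 : PySem.Set Int)
    (hcond : ∀ i j, pvAcond pe pe1 i j
      = (!(PySem.Set.contains pe (i, j)) && !(PySem.Set.contains pe (j, i))))
    (L : Int) :
    ∀ (fr : List Int) (fuel : Nat) (acc unv : List Int) (res : List (Option Int)),
      (∀ j ∈ unv, ∀ i ∈ fr, j ≠ i) →
      pvAloop pe pe1 (fr.length + fuel)
          (fr.map (fun x => (x, L)) ++ acc.map (fun x => (x, L + 1))) unv res
        = pvAloop pe pe1 fuel ((acc ++ pvFreed pe fr unv).map (fun x => (x, L + 1)))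
            (pvRem pe fr unv) (pvResA pe L fr unv res) := by
  intro fr
  induction fr with
  | nil =>
    intro fuel acc unv res _
    simp [pvFreed, pvRem, pvResA]
  | cons i t ih =>
    intro fuel acc unv res hne
    have hf : (i :: t).length + fuel = (t.length + fuel) + 1 := by
      simp only [List.length_cons]
      omega
    rw [hf, List.map_cons, List.cons_append]
    by_cases hu : unv = []
    · subst hu
      rw [pvAloop_nil_nd, pvFreed_nil, pvRem_nil, pvResA_nil, pvAloop_nil_nd]
    · rw [pvAloop_succ pe pe1 _ i L _ _ _ hu]
      have hfold := pvAfold pe pe1 hcond i L unv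
        (t.map (fun x => (x, L)) ++ acc.map (fun x => (x, L + 1))) [] res
        (fun j hj => hne j hj i (by simp))
      set filt := unv.filter (fun j => !(pvIsRoad pe i j)) with hfilt
      set unv' := unv.filter (fun j => pvIsRoad pe i j) with hunv'
      show (pvAloop pe pe1 (t.length + fuel)
          (unv.foldl (pvAinner pe pe1 i (L + 1))
            (t.map (fun x => (x, L)) ++ acc.map (fun x => (x, L + 1)), ([] : List Int), res)).1
          ((unv.foldl (pvAinner pe pe1 i (L + 1))
            (t.map (fun x => (x, L)) ++ acc.map (fun x => (x, L + 1)), ([] : List Int), res)).2.1.foldl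
            PySem.Set.discard unv)
          (unv.foldl (pvAinner pe pe1 i (L + 1))
            (t.map (fun x => (x, L)) ++ acc.map (fun x => (x, L + 1)), ([] : List Int), res)).2.2)
        = _
      rw [hfold]
      have hndf : (([] : List Int) ++ filt).foldl PySem.Set.discard unv = unv' := by
        rw [List.nil_append, pvFoldDiscard, hunv']
        apply List.filter_congr
        intro x hx
        by_cases hr : pvIsRoad pe i x = true
        · have hxf : x ∉ filt := by
            intro hmem
            have := (List.mem_filter.mp hmem).2
            rw [hr] at this
            cases this
          simp [hxf, hr]
        · have hxf : x ∈ filt := List.mem_filter.mpr ⟨hx, by simp [hr]⟩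
          simp [hxf, hr]
      rw [hndf]
      have hq : (t.map (fun x => (x, L)) ++ acc.map (fun x => (x, L + 1)))
            ++ filt.map (fun j => (j, L + 1))
          = t.map (fun x => (x, L)) ++ (acc ++ filt).map (fun x => (x, L + 1)) := by
        rw [List.append_assoc, List.map_append]
      rw [hq]
      have hne' : ∀ j ∈ unv', ∀ i' ∈ t, j ≠ i' := by
        intro j hj i' hi'
        exact hne j (List.mem_filter.mp hj).1 i' (List.mem_cons_of_mem _ hi')
      rw [ih fuel (acc ++ filt) unv' _ hne']
      show pvAloop pe pe1 fuel (((acc ++ filt) ++ pvFreed pe t unv').map _) (pvRem pe t unv') _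
        = pvAloop pe pe1 fuel ((acc ++ (filt ++ pvFreed pe t unv')).map _) (pvRem pe t unv')
            (pvResA pe L t unv' (filt.foldl (fun r j => PySem.List.pySetD r j (some (L + 1))) res))
      rw [List.append_assoc]

-- draining one level rewrites res to the masked form of one batch of dist writes
lemma pvResA_mask (pe : PySem.Set (Int × Int)) (n L : Int) :
    ∀ (fr unv : List Int) (g : Int → Option Int),
      (∀ j ∈ unv, 1 ≤ j ∧ j ≤ n) →
      pvResA pe L fr unv (none :: (PySem.List.pyRange 1 (n + 1) 1).map g)
        = none :: (PySem.List.pyRange 1 (n + 1) 1).map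
            (fun x => if x ∈ pvFreed pe fr unv then some (L + 1) else g x) := by
  intro fr
  induction fr with
  | nil =>
    intro unv g _
    have h : (PySem.List.pyRange 1 (n + 1) 1).map
          (fun x => if x ∈ pvFreed pe ([] : List Int) unv then some (L + 1) else g x)
        = (PySem.List.pyRange 1 (n + 1) 1).map g := by
      apply List.map_congr_left
      intro x _
      rw [if_neg (by simp [pvFreed])]
    rw [h]
    rfl
  | cons i t ih =>
    intro unv g hb
    set filt := unv.filter (fun j => !(pvIsRoad pe i j)) with hfilt
    set unv' := unv.filter (fun j => pvIsRoad pe i j) with hunv'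
    have hbf : ∀ j ∈ filt, 1 ≤ j ∧ j ≤ n := fun j hj => hb j (List.mem_filter.mp hj).1
    have hbu : ∀ j ∈ unv', 1 ≤ j ∧ j ≤ n := fun j hj => hb j (List.mem_filter.mp hj).1
    show pvResA pe L t unv'
        (filt.foldl (fun r j => PySem.List.pySetD r j (some (L + 1)))
          (none :: (PySem.List.pyRange 1 (n + 1) 1).map g)) = _
    rw [pvResFold n 0 L filt g hbf, ih unv' _ hbu]
    congr 1
    apply List.map_congr_left
    intro x _
    have hcons : x ∈ pvFreed pe (i :: t) unv ↔ x ∈ filt ∨ x ∈ pvFreed pe t unv' := by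
      show x ∈ filt ++ pvFreed pe t unv' ↔ _
      exact List.mem_append
    by_cases h1 : x ∈ pvFreed pe t unv'
    · rw [if_pos h1, if_pos (hcons.mpr (Or.inr h1))]
    · rw [if_neg h1]
      by_cases h2 : x ∈ filt
      · rw [if_pos h2, if_pos (hcons.mpr (Or.inl h2))]
      · rw [if_neg h2, if_neg (fun h => (hcons.mp h).elim h2 h1)]

-- the level-by-level simulation of port A against port B
lemma pvSim (pe : PySem.Set (Int × Int)) (pe1 : PySem.Set Int)
    (adj : PySem.Dict Int (PySem.Set Int))
    (hcond : ∀ i j, pvAcond pe pe1 i j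
      = (!(PySem.Set.contains pe (i, j)) && !(PySem.Set.contains pe (j, i))))
    (hadj : ∀ x j, PySem.Set.contains (adj.getD j []) x = pvIsRoad pe x j)
    (n s : Int) :
    ∀ (fuelB : Nat) (L : Int) (frA frB unv : List Int) (dist : PySem.Dict Int Int)
      (fuelA : Nat) (res : List (Option Int)),
      (∀ x, x ∈ frA ↔ x ∈ frB) →
      (∀ x ∈ frA, dist.contains x = true) →
      (∀ j ∈ unv, dist.contains j = false) →
      (∀ j ∈ unv, 1 ≤ j ∧ j ≤ n) →
      dist.get? s = some 0 →
      frA.length + unv.length ≤ fuelA →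
      (unv.length + 1 ≤ fuelB ∨ frB = []) →
      res = none :: (PySem.List.pyRange 1 (n + 1) 1).map (pvMask s dist) →
      (pvAloop pe pe1 fuelA (frA.map (fun x => (x, L))) unv res).filterMap pvF
        = (PySem.List.pyRange 1 (n + 1) 1).filterMap (pvOut (pvBloop adj fuelB L frB unv dist)) := by
  intro fuelB
  induction fuelB with
  | zero =>
    intro L frA frB unv dist fuelA res hset hfrc hunvc hunvb hs hfA hfB hres
    have hfrB : frB = [] := by
      rcases hfB with h | h
      · omega
      · exact h
    subst hfrB
    have hfrA : frA = [] := by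
      cases hA : frA with
      | nil => rfl
      | cons a t => exact absurd ((hset a).mp (by rw [hA]; simp)) (by simp)
    subst hfrA
    subst hres
    rw [pvBloop_nil_fr, List.map_nil, pvAloop_nil_q]
    exact pvOut_eq n s dist hs
  | succ f ih =>
    intro L frA frB unv dist fuelA res hset hfrc hunvc hunvb hs hfA hfB hres
    by_cases hfrB : frB = []
    · subst hfrB
      have hfrA : frA = [] := by
        cases hA : frA with
        | nil => rfl
        | cons a t => exact absurd ((hset a).mp (by rw [hA]; simp)) (by simp)
      subst hfrA
      subst hres
      rw [pvBloop_nil_fr, List.map_nil, pvAloop_nil_q]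
      exact pvOut_eq n s dist hs
    · by_cases hunv : unv = []
      · subst hunv
        subst hres
        rw [pvBloop_nil_unv, pvAloop_nil_nd]
        exact pvOut_eq n s dist hs
      · -- one level on each side
        rw [pvBloop_succ adj f L frB unv dist hfrB hunv,
          pvBfold adj frB (L + 1) unv [] [] dist]
        dsimp only
        rw [List.nil_append, List.nil_append]
        set nxt := unv.filter (fun j =>
          decide ((((frB.filter (fun x => PySem.Set.contains (adj.getD j []) x)).length : Int)) < (frB.length : Int))) with hnxt
        set rest := unv.filter (fun j =>
          !(decide ((((frB.filter (fun x => PySem.Set.contains (adj.getD j []) x)).length : Int)) < (frB.length : Int)))) with hrest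
        set dist' := nxt.foldl (fun dd j => dd.insert j (L + 1)) dist with hdist'
        obtain ⟨fuelA', rfl⟩ : ∃ k, fuelA = frA.length + k :=
          ⟨fuelA - frA.length, by omega⟩
        have hneA : ∀ j ∈ unv, ∀ i ∈ frA, j ≠ i := by
          intro j hj i hi h
          have h1 := hfrc i hi
          have h2 := hunvc j hj
          rw [h, h1] at h2
          cases h2
        have hacc0 : frA.map (fun x => (x, L))
            = frA.map (fun x => (x, L)) ++ ([] : List Int).map (fun x => (x, L + 1)) := by simp
        rw [hacc0, pvAlevel pe pe1 hcond L frA fuelA' [] unv res hneA, List.nil_append]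
        -- the counting test recognises exactly the nodes some frontier member frees
        have hPBiff : ∀ j,
            (decide ((((frB.filter (fun x => PySem.Set.contains (adj.getD j []) x)).length : Int)) < (frB.length : Int)) = true)
              ↔ ∃ x ∈ frA, pvIsRoad pe x j = false := by
          intro j
          rw [decide_eq_true_eq, pvCnt_lt]
          constructor
          · rintro ⟨x, hx, hq⟩
            refine ⟨x, (hset x).mpr hx, ?_⟩
            rw [hadj] at hq
            exact hq
          · rintro ⟨x, hx, hq⟩
            refine ⟨x, (hset x).mp hx, ?_⟩
            rw [hadj]
            exact hq
        have hfreedmem : ∀ j, j ∈ pvFreed pe frA unv ↔ j ∈ nxt := by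
          intro j
          rw [pvFreed_mem, hnxt, List.mem_filter]
          constructor
          · rintro ⟨hu, x, hx, hxf⟩
            exact ⟨hu, (hPBiff j).mpr ⟨x, hx, hxf⟩⟩
          · rintro ⟨hu, hpb⟩
            exact ⟨hu, (hPBiff j).mp hpb⟩
        have hrem : pvRem pe frA unv = rest := by
          rw [pvRem_eq, hrest]
          apply List.filter_congr
          intro j _
          cases hpb : decide ((((frB.filter (fun x => PySem.Set.contains (adj.getD j []) x)).length : Int)) < (frB.length : Int)) with
          | false =>
            have hall : ∀ x ∈ frA, pvIsRoad pe x j = true := by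
              intro x hx
              by_contra hc
              have : _ = true := (hPBiff j).mpr ⟨x, hx, by simpa using hc⟩
              rw [hpb] at this
              cases this
            simp only [Bool.not_false]
            rw [List.all_eq_true]
            intro x hx
            exact hall x hx
          | true =>
            obtain ⟨x, hx, hxf⟩ := (hPBiff j).mp hpb
            simp only [Bool.not_true]
            rw [List.all_eq_false]
            exact ⟨x, hx, by simp [hxf]⟩
        have hs_nxt : s ∉ nxt := by
          intro hmem
          have h1 : dist.contains s = true := by
            rw [PySem.Dict.contains_eq_isSome_get?, hs]
            rfl
          have h2 := hunvc s (List.mem_filter.mp hmem).1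
          rw [h2] at h1
          cases h1
        have hresA : pvResA pe L frA unv res
            = none :: (PySem.List.pyRange 1 (n + 1) 1).map (pvMask s dist') := by
          rw [hres, pvResA_mask pe n L frA unv _ hunvb]
          congr 1
          apply List.map_congr_left
          intro x _
          by_cases hx : x ∈ pvFreed pe frA unv
          · have hxn : x ∈ nxt := (hfreedmem x).mp hx
            have hxs : x ≠ s := fun h => hs_nxt (h ▸ hxn)
            rw [if_pos hx]
            have hg : dist'.get? x = some (L + 1) := by
              rw [hdist', pvFoldInsertGet, if_pos hxn]
            simp [pvMask, hg, hxs]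
          · have hxn : x ∉ nxt := fun h => hx ((hfreedmem x).mpr h)
            rw [if_neg hx]
            have hg : dist'.get? x = dist.get? x := by
              rw [hdist', pvFoldInsertGet, if_neg hxn]
            simp [pvMask, hg]
        rw [hrem, hresA]
        -- hypotheses for the next level
        have hlen : nxt.length + rest.length = unv.length := by
          rw [hnxt, hrest]
          exact pvFilter_len _ unv
        have hpart : (pvFreed pe frA unv).length + rest.length = unv.length := by
          have := pvPartition_len pe frA unv
          rw [hrem] at this
          exact this
        have hfA' : (pvFreed pe frA unv).length + rest.length ≤ fuelA' := by omega
        have hfB' : rest.length + 1 ≤ f ∨ nxt = [] := by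
          by_cases hn0 : nxt = []
          · exact Or.inr hn0
          · left
            have h1 : 1 ≤ nxt.length := List.length_pos_iff.mpr hn0
            have h2 : unv.length + 1 ≤ f + 1 := by
              rcases hfB with h | h
              · exact h
              · exact absurd h hfrB
            omega
        refine ih (L + 1) (pvFreed pe frA unv) nxt rest dist' fuelA' _ hfreedmem ?_ ?_ ?_ ?_ hfA' hfB' rfl
        · intro x hx
          have hxn : x ∈ nxt := (hfreedmem x).mp hx
          rw [hdist', pvFoldInsertContains]
          simp [hxn]
        · intro j hj
          have hju : j ∈ unv := (List.mem_filter.mp hj).1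
          have hjn : j ∉ nxt := by
            intro hmem
            have h1 := (List.mem_filter.mp hmem).2
            have h2 := (List.mem_filter.mp hj).2
            simp only [h1] at h2
            cases h2
          rw [hdist', pvFoldInsertContains]
          simp [hjn, hunvc j hju]
        · intro j hj
          exact hunvb j (List.mem_filter.mp hj).1
        · rw [hdist', pvFoldInsertGet, if_neg hs_nxt]
          exact hs

lemma pvMain (n m : Int) (mr : List (Int × Int)) (s : Int) :
    shortest_village_distances n m mr s = shortest_village_distances_alt n m mr s := by
  unfold shortest_village_distances shortest_village_distances_alt
  by_cases hn : 0 ≤ n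
  · show (pvAloop (PySem.Set.ofList mr) (PySem.Set.ofList (mr.flatMap (fun r => [r.1, r.2])))
        (n.toNat + 1) [(s, 0)]
        (PySem.Set.discard (PySem.Set.ofList (PySem.List.pyRange 1 (n + 1) 1)) s)
        (List.replicate (n + 1).toNat none)).filterMap pvF
      = (PySem.List.pyRange 1 (n + 1) 1).filterMap
          (pvOut (pvBloop (pvAdjOf mr) (n.toNat + 1) 0 [s]
            ((PySem.List.pyRange 1 (n + 1) 1).filter (fun j => !(j == s)))
            (PySem.Dict.empty.insert s 0)))
    have hnd0 : PySem.Set.discard (PySem.Set.ofList (PySem.List.pyRange 1 (n + 1) 1)) s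
        = (PySem.List.pyRange 1 (n + 1) 1).filter (fun j => !(j == s)) := by
      rw [PySem.Set.ofList_eq_self_of_nodup _ (pvR_nodup n)]
      rfl
    rw [hnd0]
    have hq0 : [((s : Int), (0 : Int))] = [s].map (fun x => (x, (0 : Int))) := rfl
    rw [hq0]
    have hulen : ((PySem.List.pyRange 1 (n + 1) 1).filter (fun j => !(j == s))).length ≤ n.toNat := by
      have h1 := List.length_filter_le (fun j => !(j == s)) (PySem.List.pyRange 1 (n + 1) 1)
      have h2 : (PySem.List.pyRange 1 (n + 1) 1).length = n.toNat := by
        rw [pvR_eq]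
        simp
      omega
    refine pvSim (PySem.Set.ofList mr) _ (pvAdjOf mr) (fun i j => pvCond_eq mr i j)
      (fun x j => pvAdj_road mr j x) n s (n.toNat + 1) 0 [s] [s] _ _ (n.toNat + 1) _
      (fun x => Iff.rfl) ?_ ?_ ?_ ?_ ?_ ?_ ?_
    · intro x hx
      have hxs : x = s := by simpa using hx
      subst hxs
      rw [PySem.Dict.contains_insert]
      simp
    · intro j hj
      have hjs : j ≠ s := by simpa using (List.mem_filter.mp hj).2
      rw [PySem.Dict.contains_insert]
      simp [PySem.Dict.contains_empty, hjs]
    · intro j hj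
      exact (pvR_mem n j).mp (List.mem_filter.mp hj).1
    · exact PySem.Dict.get?_insert_self _ _ _
    · simp only [List.length_cons, List.length_nil]
      omega
    · left
      omega
    · have h1 : (n + 1).toNat = n.toNat + 1 := by omega
      rw [h1, List.replicate_succ]
      congr 1
      have hlen : (PySem.List.pyRange 1 (n + 1) 1).length = n.toNat := by
        rw [pvR_eq]
        simp
      symm
      rw [List.eq_replicate_iff]
      refine ⟨by simp [hlen], ?_⟩
      intro b hb
      rw [List.mem_map] at hb
      obtain ⟨x, hx, rfl⟩ := hb
      unfold pvMask
      by_cases hxs : x = s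
      · subst hxs
        rw [PySem.Dict.get?_insert_self]
        simp
      · rw [PySem.Dict.get?_insert_of_ne _ _ hxs, PySem.Dict.get?_empty]
  · have hR : PySem.List.pyRange 1 (n + 1) 1 = ([] : List Int) := by
      rw [pvR_eq, Int.toNat_of_nonpos (by omega)]
      rfl
    have h0 : (n + 1).toNat = 0 := by omega
    rw [hR, h0]
    show (pvAloop _ _ (n.toNat + 1) [(s, 0)] (PySem.Set.discard (PySem.Set.ofList ([] : List Int)) s)
        (List.replicate 0 none)).filterMap pvF = ([] : List Int).filterMap _
    rw [show PySem.Set.discard (PySem.Set.ofList ([] : List Int)) s = ([] : List Int) from rfl]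
    rw [pvAloop_nil_nd]
    rfl

-- ===== VERDICT (by name: the statement is the Claim_ definition above) =====
theorem shortest_village_distances_spec : Claim_equal_shortest_village_distances := by
  intro n m main_roads start_node _
  unfold Spec_shortest_village_distances
  exact pvMain n m main_roads start_node
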